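-- pv_equiv track=rewrite | github.com/myxtype/12306-train-assistant | client.py | _find_train_row
-- ===== SOURCE A (Python) =====
-- from typing import Any
--
-- def _find_train_row(rows: list[dict[str, Any]], train_code: str) -> dict[str, Any]:
--     normalized = train_code.strip().upper()
--     matches = [row for row in rows if str(row.get("train_code", "")).upper() == normalized]
--     if not matches:
--         sample = ", ".join(sorted({str(row.get("train_code", "")) for row in rows if row.get("train_code")})[:20])
--         raise RuntimeError(f"未找到车次 {train_code}。可选车次示例: {sample or '无'}")
--     buyable = [row for row in matches if str(row.get("can_web_buy", "")).upper() == "Y"]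
--     return buyable[0] if buyable else matches[0]
-- ===== SOURCE B (Python) =====
-- def _find_train_row(rows: list, train_code: str) -> dict:
--     normalized = train_code.strip().upper()
--     first_match = None
--     for row in rows:
--         if str(row.get("train_code", "")).upper() == normalized:
--             if str(row.get("can_web_buy", "")).upper() == "Y":
--                 return row
--             if first_match is None:
--                 first_match = row
--     if first_match is not None:
--         return first_match
--     sample = ", ".join(sorted({str(row.get("train_code", "")) for row in rows if row.get("train_code")})[:20])
--     raise RuntimeError(f"未找到车次 {train_code}。可选车次示例: {sample or '无'}")
-- ===== Notes on version B (the rewrite author's own statement) =====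
-- stated objective: alternative
-- what changed: Replaces A's two full list-comprehension passes (all matches, then all buyable matches) by a single early-exit scan that returns the first buyable match immediately and otherwise remembers the first match.
import Mathlib
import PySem

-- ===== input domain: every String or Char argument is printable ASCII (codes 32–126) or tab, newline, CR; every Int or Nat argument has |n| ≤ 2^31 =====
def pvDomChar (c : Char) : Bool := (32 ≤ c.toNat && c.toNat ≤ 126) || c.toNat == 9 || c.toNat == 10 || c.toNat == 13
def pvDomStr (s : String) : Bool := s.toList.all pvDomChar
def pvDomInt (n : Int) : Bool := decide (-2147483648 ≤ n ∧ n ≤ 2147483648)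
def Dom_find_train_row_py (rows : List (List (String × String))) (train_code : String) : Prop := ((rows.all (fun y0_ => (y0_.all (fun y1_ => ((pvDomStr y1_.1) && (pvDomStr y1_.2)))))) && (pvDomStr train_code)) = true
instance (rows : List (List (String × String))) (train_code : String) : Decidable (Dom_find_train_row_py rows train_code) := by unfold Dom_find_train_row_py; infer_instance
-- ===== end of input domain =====

-- B is a single early-exit scan (first buyable match returned at once, first match remembered)
-- instead of A's two list-comprehension passes; proved to return the same row wherever A returns.

-- shared transliteration of Python's `str(row.get(k, "")).upper()` on a string-valued dict
-- (association list, first match wins — exact for Python dicts, whose keys are unique)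
def rowUpperGet (row : List (String × String)) (k : String) : String :=
  PySem.Str.upper (((row.find? (fun p => p.1 == k)).map Prod.snd).getD "")

-- ===== PORT A =====
def find_train_row_py (rows : List (List (String × String))) (train_code : String) : List (String × String) :=
  let normalized := PySem.Str.upper (PySem.Str.strip train_code)
  let matched := rows.filter (fun row => rowUpperGet row "train_code" == normalized)
  -- the `if not matched: raise RuntimeError(...)` branch is excluded by Pre_ (A raises there)
  let buyable := matched.filter (fun row => rowUpperGet row "can_web_buy" == "Y")
  match buyable with
  | b :: _ => b
  | [] => matched.headD []

-- ===== PORT B =====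
def find_train_row_py_alt_go (normalized : String) (first_match : Option (List (String × String))) :
    List (List (String × String)) → List (String × String)
  | [] =>
    -- `if first_match is not None: return first_match` ; the trailing raise is excluded by Pre_
    match first_match with
    | some r => r
    | none => []
  | row :: rest =>
    if rowUpperGet row "train_code" == normalized then
      if rowUpperGet row "can_web_buy" == "Y" then row
      else
        match first_match with
        | some _ => find_train_row_py_alt_go normalized first_match rest
        | none => find_train_row_py_alt_go normalized (some row) rest
    else find_train_row_py_alt_go normalized first_match rest

def find_train_row_py_alt (rows : List (List (String × String))) (train_code : String) : List (String × String) :=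
  let normalized := PySem.Str.upper (PySem.Str.strip train_code)
  find_train_row_py_alt_go normalized none rows

-- ===== PRECONDITION & SPEC =====
-- Pre_ excludes exactly the inputs on which A raises RuntimeError: no row whose
-- train_code (uppercased) equals the stripped+uppercased requested code.
def Pre_find_train_row_py (rows : List (List (String × String))) (train_code : String) : Prop :=
  (rows.any (fun row => rowUpperGet row "train_code" == PySem.Str.upper (PySem.Str.strip train_code))) = true
instance (rows : List (List (String × String))) (train_code : String) : Decidable (Pre_find_train_row_py rows train_code) := by unfold Pre_find_train_row_py; infer_instance

def pvWitness_find_train_row_py : (List (List (String × String))) × String :=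
  ([[("train_code", "G1"), ("can_web_buy", "N")], [("train_code", "g1"), ("can_web_buy", "Y")]], " g1 ")

def Spec_find_train_row_py (rows : List (List (String × String))) (train_code : String) (out : List (String × String)) : Prop := out = find_train_row_py_alt rows train_code
instance (rows : List (List (String × String))) (train_code : String) (out : List (String × String)) : Decidable (Spec_find_train_row_py rows train_code out) := by unfold Spec_find_train_row_py; infer_instance

-- ===== CLAIM (what is proved, stated in full; the proofs are below) =====
def Claim_equal_find_train_row_py : Prop := ∀ (rows : List (List (String × String))) (train_code : String), Dom_find_train_row_py rows train_code → Pre_find_train_row_py rows train_code → Spec_find_train_row_py rows train_code (find_train_row_py rows train_code)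

-- ===== LEMMAS AND PROOFS =====

-- Characterisation of B's scan: the result is the first buyable match if any,
-- otherwise the remembered first match, otherwise the head of all matched.
theorem alt_go_eq (normalized : String) (rows : List (List (String × String)))
    (first : Option (List (String × String))) :
    find_train_row_py_alt_go normalized first rows =
      (match ((rows.filter (fun row => rowUpperGet row "train_code" == normalized)).filter
          (fun row => rowUpperGet row "can_web_buy" == "Y")) with
       | b :: _ => b
       | [] =>
         match first with
         | some r => r
         | none => (rows.filter (fun row => rowUpperGet row "train_code" == normalized)).headD []) := by
  induction rows generalizing first with
  | nil => cases first <;> rfl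
  | cons row rest ih =>
    by_cases hm : (rowUpperGet row "train_code" == normalized) = true
    · by_cases hb : (rowUpperGet row "can_web_buy" == "Y") = true
      · simp [find_train_row_py_alt_go, hm, hb]
      · cases first with
        | none =>
          rw [show find_train_row_py_alt_go normalized none (row :: rest)
              = find_train_row_py_alt_go normalized (some row) rest from by
            simp [find_train_row_py_alt_go, hm, hb]]
          rw [ih (some row)]
          simp [hm, hb]
        | some r =>
          rw [show find_train_row_py_alt_go normalized (some r) (row :: rest)
              = find_train_row_py_alt_go normalized (some r) rest from by
            simp [find_train_row_py_alt_go, hm, hb]]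
          rw [ih (some r)]
          simp [hm, hb]
    · rw [show find_train_row_py_alt_go normalized first (row :: rest)
          = find_train_row_py_alt_go normalized first rest from by
        simp [find_train_row_py_alt_go, hm]]
      rw [ih first]
      simp [hm]

-- ===== VERDICT (by name: the statement is the Claim_ definition above) =====
theorem find_train_row_py_spec : Claim_equal_find_train_row_py := by
  intro rows train_code _ _
  unfold Spec_find_train_row_py find_train_row_py find_train_row_py_alt
  rw [alt_go_eq]
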